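-- pv_equiv track=rewrite | github.com/Minghao-Wang-SCU/OB-DPD | main.py | generate_all_is_peg_list
-- ===== SOURCE A (Python) =====
-- def generate_all_is_peg_list(is_peg_list, split_number_list, all_cg_smiles_list):
--     """
--     按split_number_list的分组规则，结合is_peg_list的标记生成all_is_peg_list
--     """
--     if len(is_peg_list) != len(split_number_list):
--         # 如果长度不一致，尝试补齐
--         pass
--
--     adjusted_split = [1 if cnt == 0 else cnt for cnt in split_number_list]
--
--     cumulative_counts = [0]
--     for cnt in adjusted_split:
--         cumulative_counts.append(cumulative_counts[-1] + cnt)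
--
--     all_is_peg_list = []
--
--     # 遍历每个子列表（即每个片段）
--     for sublist_idx, sublist in enumerate(all_cg_smiles_list):
--         group_idx = 0
--         for i, count in enumerate(cumulative_counts[1:]):
--             if sublist_idx < count:
--                 group_idx = i
--                 break
--
--         if group_idx < len(is_peg_list):
--             is_peg = is_peg_list[group_idx]
--         else:
--             is_peg = 0
--
--         all_is_peg_list.extend([is_peg] * len(sublist))
--
--     return all_is_peg_list
-- ===== SOURCE B (Python) =====
-- def generate_all_is_peg_list(is_peg_list, split_number_list, all_cg_smiles_list):
--     n = len(all_cg_smiles_list)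
--     # advancing-pointer assignment: group i claims the still-unassigned prefix below its cumulative count
--     groups = []
--     total = 0
--     for i, cnt in enumerate(split_number_list):
--         total += 1 if cnt == 0 else cnt
--         target = min(total, n)
--         while len(groups) < target:
--             groups.append(i)
--     groups.extend([0] * (n - len(groups)))
--     out = []
--     for g, sublist in zip(groups, all_cg_smiles_list):
--         peg = is_peg_list[g] if g < len(is_peg_list) else 0
--         out.extend([peg] * len(sublist))
--     return out
-- ===== Notes on version B (the rewrite author's own statement) =====
-- stated objective: faster
-- what changed: B replaces A's per-sublist linear scan of the cumulative counts by a single advancing-pointer pass that precomputes the group index of every sublist once, then emits the flags in one zip pass.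
import Mathlib
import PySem

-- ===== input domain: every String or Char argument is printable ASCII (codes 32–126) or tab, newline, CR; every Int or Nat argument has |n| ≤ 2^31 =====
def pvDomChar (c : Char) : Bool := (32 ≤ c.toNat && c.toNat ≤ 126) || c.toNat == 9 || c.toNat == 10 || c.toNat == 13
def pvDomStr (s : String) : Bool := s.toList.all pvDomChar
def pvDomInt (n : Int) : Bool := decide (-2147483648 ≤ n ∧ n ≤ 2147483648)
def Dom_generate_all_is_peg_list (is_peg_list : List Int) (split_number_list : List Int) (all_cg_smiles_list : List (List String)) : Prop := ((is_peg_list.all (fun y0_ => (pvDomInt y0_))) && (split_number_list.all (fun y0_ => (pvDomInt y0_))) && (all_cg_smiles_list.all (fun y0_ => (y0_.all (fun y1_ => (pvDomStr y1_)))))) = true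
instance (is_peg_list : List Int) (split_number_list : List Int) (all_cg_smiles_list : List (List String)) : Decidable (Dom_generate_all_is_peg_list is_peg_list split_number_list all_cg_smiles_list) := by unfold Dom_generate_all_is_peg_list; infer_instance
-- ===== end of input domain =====

-- ===== PORT A =====
-- B assigns each sublist its group with one advancing-pointer pass instead of A's per-sublist
-- scan of the cumulative counts (objective: faster, asymptotic O(N+G+M) vs O(N*G+M)).

-- inner 'for i, count in enumerate(cumulative_counts[1:]): if sublist_idx < count: group_idx = i; break' (default 0)
def pvGroupIdx : List (Int × Int) → Int → Int
  | [], _ => 0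
  | p :: rest, idx => if idx < p.2 then p.1 else pvGroupIdx rest idx

def generate_all_is_peg_list (is_peg_list : List Int) (split_number_list : List Int) (all_cg_smiles_list : List (List String)) : List Int :=
  let adjusted := split_number_list.map (fun cnt => if cnt = 0 then 1 else cnt)
  -- cumulative_counts built by appending cumulative_counts[-1] + cnt (the running last is carried in the state)
  let cums := (adjusted.foldl (fun (st : List Int × Int) cnt =>
      (st.1 ++ [st.2 + cnt], st.2 + cnt)) ([0], 0)).1
  (PySem.List.enumerate all_cg_smiles_list 0).foldl (fun acc p =>
      let g := pvGroupIdx (PySem.List.enumerate (cums.drop 1) 0) p.1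
      let is_peg := if g < (is_peg_list.length : Int) then PySem.List.pyGetD is_peg_list g 0 else 0
      acc ++ List.replicate p.2.length is_peg) []

-- ===== PORT B =====
def generate_all_is_peg_list_alt (is_peg_list : List Int) (split_number_list : List Int) (all_cg_smiles_list : List (List String)) : List Int :=
  let n := all_cg_smiles_list.length
  -- advancing pointer: group i claims the still-unassigned indices below min(total, n)
  let groups := ((PySem.List.enumerate split_number_list 0).foldl (fun (st : List Int × Int) p =>
      let total := st.2 + (if p.2 = 0 then 1 else p.2)
      let target := min total.toNat n
      (st.1 ++ List.replicate (target - st.1.length) p.1, total)) ([], 0)).1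
  let groupsFull := groups ++ List.replicate (n - groups.length) 0
  (groupsFull.zip all_cg_smiles_list).foldl (fun acc p =>
      let peg := if p.1 < (is_peg_list.length : Int) then PySem.List.pyGetD is_peg_list p.1 0 else 0
      acc ++ List.replicate p.2.length peg) []

-- ===== PRECONDITION & SPEC =====
def Spec_generate_all_is_peg_list (is_peg_list : List Int) (split_number_list : List Int) (all_cg_smiles_list : List (List String)) (out : List Int) : Prop := out = generate_all_is_peg_list_alt is_peg_list split_number_list all_cg_smiles_list
instance (is_peg_list : List Int) (split_number_list : List Int) (all_cg_smiles_list : List (List String)) (out : List Int) : Decidable (Spec_generate_all_is_peg_list is_peg_list split_number_list all_cg_smiles_list out) := by unfold Spec_generate_all_is_peg_list; infer_instance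

-- ===== CLAIM (what is proved, stated in full; the proofs are below) =====
def Claim_equal_generate_all_is_peg_list : Prop := ∀ (is_peg_list : List Int) (split_number_list : List Int) (all_cg_smiles_list : List (List String)), Dom_generate_all_is_peg_list is_peg_list split_number_list all_cg_smiles_list → Spec_generate_all_is_peg_list is_peg_list split_number_list all_cg_smiles_list (generate_all_is_peg_list is_peg_list split_number_list all_cg_smiles_list)

-- ===== LEMMAS AND PROOFS =====

-- prefix sums of a list starting from accumulator t
def pvPSums (t : Int) : List Int → List Int
  | [] => []
  | c :: r => (t + c) :: pvPSums (t + c) r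

-- B's group-claiming step, abstracted over the already-adjusted count
def pvStep (n : Nat) (st : List Int × Int) (p : Int × Int) : List Int × Int :=
  (st.1 ++ List.replicate (min (st.2 + p.2).toNat n - st.1.length) p.1, st.2 + p.2)

-- closed form of A's cumulative_counts fold
theorem pvCumsEq (l : List Int) (pre : List Int) (t : Int) :
    (l.foldl (fun (st : List Int × Int) cnt => (st.1 ++ [st.2 + cnt], st.2 + cnt)) (pre, t))
      = (pre ++ pvPSums t l, (pvPSums t l).getLastD t) := by
  induction l generalizing pre t with
  | nil => simp [pvPSums]
  | cons c r ih =>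
      simp only [List.foldl_cons, pvPSums, ih]
      refine Prod.ext (by simp) ?_
      cases h : pvPSums (t + c) r <;> simp [List.getLast?_cons]

theorem pvEnumerateMap {α β : Type} (f : α → β) (l : List α) (s : Int) :
    PySem.List.enumerate (l.map f) s = (PySem.List.enumerate l s).map (fun p => (p.1, f p.2)) := by
  induction l generalizing s with
  | nil => simp [PySem.List.enumerate_nil]
  | cons x xs ih => simp [PySem.List.enumerate_cons, ih]

-- B's group-building fold, with the final zero padding, equals the pointwise group map of A's scan
theorem pvBInv (n : Nat) (l : List Int) (s : Nat) (t : Int) (g : List Int)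
    (h1 : min t.toNat n ≤ g.length) (h2 : g.length ≤ n) :
    (((PySem.List.enumerate l (s : Int)).foldl (pvStep n) (g, t)).1
      ++ List.replicate (n - ((PySem.List.enumerate l (s : Int)).foldl (pvStep n) (g, t)).1.length) 0)
    = g ++ (List.range' g.length (n - g.length)).map
        (fun (k : Nat) => pvGroupIdx (PySem.List.enumerate (pvPSums t l) (s : Int)) (k : Int)) := by
  induction l generalizing s t g with
  | nil =>
      simp only [PySem.List.enumerate_nil, List.foldl_nil, pvPSums]
      congr 1
      rw [List.map_congr_left (g := fun _ => (0 : Int)) (fun k _ => by simp [pvGroupIdx])]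
      rw [List.map_const', List.length_range']
  | cons c r ih =>
      have hcast : ((s : Int) + 1) = ((s + 1 : Nat) : Int) := by push_cast; ring
      rw [pvPSums, PySem.List.enumerate_cons, PySem.List.enumerate_cons, List.foldl_cons, hcast]
      have hstep : pvStep n (g, t) ((s : Int), c)
          = (g ++ List.replicate (min (t + c).toNat n - g.length) (s : Int), t + c) := rfl
      rw [hstep]
      have hlen : (g ++ List.replicate (min (t + c).toNat n - g.length) (s : Int)).length
          = max g.length (min (t + c).toNat n) := by simp; omega
      rw [ih (s + 1) (t + c) _ (by rw [hlen]; omega) (by rw [hlen]; omega)]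
      rw [hlen]
      -- split the index range at the new covered length
      have hsplit : n - g.length = (max g.length (min (t + c).toNat n) - g.length)
          + (n - max g.length (min (t + c).toNat n)) := by omega
      rw [hsplit, ← List.range'_append_1 (s := g.length), List.map_append, List.append_assoc]
      have hofs : g.length + (max g.length (min (t + c).toNat n) - g.length)
          = max g.length (min (t + c).toNat n) := by omega
      rw [hofs]
      congr 1
      congr 1
      · -- freshly claimed chunk: every index there maps to group s
        rw [List.map_congr_left (g := fun _ => (s : Int)) (fun k hk => by
          rw [List.mem_range'_1] at hk
          have hk2 : (k : Int) < t + c := by omega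
          simp [pvGroupIdx, hk2])]
        rw [List.map_const', List.length_range']
        congr 1
        omega
      · -- indices beyond the covered length skip this group
        exact List.map_congr_left (fun k hk => by
          rw [List.mem_range'_1] at hk
          have hk2 : ¬ ((k : Int) < t + c) := by omega
          simp [pvGroupIdx, hk2])

-- zip against the precomputed group map is the same traversal as enumerate composed with the group function
theorem pvFlatZip (ac : List (List String)) (s : Nat) (F : Int → Int) (f : Int → List String → List Int) :
    (((List.range' s ac.length).map (fun (k : Nat) => F (k : Int))).zip ac).flatMap (fun p => f p.1 p.2)
    = (PySem.List.enumerate ac (s : Int)).flatMap (fun p => f (F p.1) p.2) := by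
  induction ac generalizing s with
  | nil => simp [PySem.List.enumerate_nil]
  | cons x xs ih =>
      have hcast : ((s : Int) + 1) = ((s + 1 : Nat) : Int) := by push_cast; ring
      rw [List.length_cons, List.range'_succ, List.map_cons, List.zip_cons_cons,
        PySem.List.enumerate_cons, List.flatMap_cons, List.flatMap_cons, hcast, ih]

-- ===== VERDICT (by name: the statement is the Claim_ definition above) =====
theorem generate_all_is_peg_list_spec : Claim_equal_generate_all_is_peg_list := by
  intro ip sp ac _
  unfold Spec_generate_all_is_peg_list generate_all_is_peg_list generate_all_is_peg_list_alt
  simp only []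
  rw [pvCumsEq]
  simp only [List.singleton_append, List.drop_succ_cons, List.drop_zero]
  have hBfold : List.foldl
        (fun (st : List Int × Int) (p : Int × Int) =>
          (st.1 ++ List.replicate (min (st.2 + if p.2 = 0 then 1 else p.2).toNat ac.length - st.1.length) p.1,
            st.2 + if p.2 = 0 then 1 else p.2)) ([], 0) (PySem.List.enumerate sp)
      = List.foldl (pvStep ac.length) ([], 0)
          (PySem.List.enumerate (sp.map (fun cnt => if cnt = 0 then 1 else cnt)) 0) := by
    rw [pvEnumerateMap, List.foldl_map]
    rfl
  rw [hBfold]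
  have hB := pvBInv ac.length (sp.map (fun cnt => if cnt = 0 then 1 else cnt)) 0 0 []
      (by simp) (by simp)
  simp only [Nat.cast_zero, Nat.sub_zero, List.length_nil, List.nil_append] at hB
  rw [hB]
  rw [PySem.List.foldl_append_eq_flatMap, PySem.List.foldl_append_eq_flatMap, List.nil_append,
    List.nil_append]
  have hZ := pvFlatZip ac 0
      (fun g => pvGroupIdx (PySem.List.enumerate
        (pvPSums 0 (sp.map (fun cnt => if cnt = 0 then 1 else cnt))) 0) g)
      (fun g sub => List.replicate sub.length
        (if g < (ip.length : Int) then PySem.List.pyGetD ip g 0 else 0))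
  simp only [Nat.cast_zero] at hZ
  rw [hZ]
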